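-- pv_equiv track=rewrite | github.com/gs-ntiwari/Natural-Langauge-Processing | Classification using Perceptron model/utils.py | countWordsForEachClass
-- ===== SOURCE A (Python) =====
-- def countWordsForEachClass(Train_data_dict, Train_labela, Train_labelb):
--     countWordsForEachClassDict=dict()
--     for i in range(len(Train_data_dict)):
--         if countWordsForEachClassDict.get(Train_labela[i])==None:
--             countWordsForEachClassDict[Train_labela[i]]=dict(Train_data_dict[i])
--         else:
--             countWordsForEachClassDict=updatedictionaryWithWords(Train_labela[i], Train_data_dict[i], countWordsForEachClassDict)
--
--         if countWordsForEachClassDict.get(Train_labelb[i])==None: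
--             countWordsForEachClassDict[Train_labelb[i]]=dict(Train_data_dict[i])
--         else:
--             countWordsForEachClassDict=updatedictionaryWithWords(Train_labelb[i], Train_data_dict[i], countWordsForEachClassDict)
--     return countWordsForEachClassDict
--
-- def updatedictionaryWithWords(label, dictionary, countWordsForEachClassDict):
--     for key,value in dictionary.items():
--         if countWordsForEachClassDict.get(label).get(key)==None:
--             countWordsForEachClassDict.get(label)[key]=value
--         else:
--             countWordsForEachClassDict.get(label)[key]+=value
--     return countWordsForEachClassDict
-- ===== SOURCE B (Python) =====
-- def countWordsForEachClass(Train_data_dict, Train_labela, Train_labelb):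
--     # Phase 1: group the example dicts by label (an example whose two labels
--     # coincide contributes twice to that label's group, as in the original).
--     groups = {}
--     for i in range(len(Train_data_dict)):
--         d = Train_data_dict[i]
--         groups.setdefault(Train_labela[i], []).append(d)
--         groups.setdefault(Train_labelb[i], []).append(d)
--     # Phase 2: for each label, merge its group into a fresh dict key-wise.
--     result = {}
--     for label, ds in groups.items():
--         merged = {}
--         for d in ds:
--             for k, v in d.items():
--                 merged[k] = merged.get(k, 0) + v
--         result[label] = merged
--     return result
-- ===== Notes on version B (the rewrite author's own statement) =====
-- stated objective: alternative
-- what changed: B replaces A's single pass that merges each example directly into the running dict-of-dicts (copy-on-first-sight, else key-wise += via a helper) with a two-phase decomposition: first group the example dicts into per-label lists, then merge each label's group into a fresh dict by key-wise addition.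
import Mathlib
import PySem

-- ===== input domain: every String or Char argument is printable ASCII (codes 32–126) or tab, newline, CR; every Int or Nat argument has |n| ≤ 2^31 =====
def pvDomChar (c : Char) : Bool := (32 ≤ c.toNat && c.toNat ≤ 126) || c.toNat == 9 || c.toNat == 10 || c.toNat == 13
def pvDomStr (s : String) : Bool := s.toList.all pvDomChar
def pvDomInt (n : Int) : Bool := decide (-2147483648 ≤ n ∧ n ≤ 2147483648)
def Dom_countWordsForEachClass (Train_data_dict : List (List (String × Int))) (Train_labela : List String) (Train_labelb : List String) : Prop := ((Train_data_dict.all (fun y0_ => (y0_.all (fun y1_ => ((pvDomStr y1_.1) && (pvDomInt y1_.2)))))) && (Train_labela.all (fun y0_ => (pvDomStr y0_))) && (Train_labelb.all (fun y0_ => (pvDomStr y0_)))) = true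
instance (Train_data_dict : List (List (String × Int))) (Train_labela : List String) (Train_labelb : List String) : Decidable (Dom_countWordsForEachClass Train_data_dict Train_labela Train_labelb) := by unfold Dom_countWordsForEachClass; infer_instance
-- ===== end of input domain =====

-- B replaces A's one-pass merge-as-you-go with a two-phase decomposition (group per label,
-- then merge each group into a fresh dict); same cost, alternative structure.

-- ===== PORT A =====
-- the Python helper mutates the inner dict cwd.get(label) in place while looping over
-- dictionary.items(); rendered as one modify of that inner dict by the same item loop
def updatedictionaryWithWords (label : String) (dictionary : PySem.Dict String Int)
    (cwd : PySem.Dict String (PySem.Dict String Int)) : PySem.Dict String (PySem.Dict String Int) :=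
  cwd.modify label PySem.Dict.empty (fun inner =>
    dictionary.items.foldl (fun inner kv =>
      match inner.get? kv.1 with
      | none => inner.insert kv.1 kv.2
      | some v => inner.insert kv.1 (v + kv.2)) inner)

-- inner Python dicts arrive as association lists; dict semantics via PySem.Dict.ofList
def countWordsForEachClass (Train_data_dict : List (List (String × Int))) (Train_labela : List String) (Train_labelb : List String) : List (String × List (String × Int)) :=
  let final := (PySem.List.pyRange 0 (Train_data_dict.length : Int) 1).foldl (fun acc i =>
    let d := PySem.Dict.ofList (PySem.List.pyGetD Train_data_dict i [])
    let la := PySem.List.pyGetD Train_labela i ""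
    let acc1 := match acc.get? la with
      | none => acc.insert la d
      | some _ => updatedictionaryWithWords la d acc
    let lb := PySem.List.pyGetD Train_labelb i ""
    match acc1.get? lb with
      | none => acc1.insert lb d
      | some _ => updatedictionaryWithWords lb d acc1) PySem.Dict.empty
  final.items.map (fun p => (p.1, p.2.items))

-- ===== PORT B =====
def countWordsForEachClass_alt (Train_data_dict : List (List (String × Int))) (Train_labela : List String) (Train_labelb : List String) : List (String × List (String × Int)) :=
  let groups := (PySem.List.pyRange 0 (Train_data_dict.length : Int) 1).foldl (fun g i =>
    let d := PySem.Dict.ofList (PySem.List.pyGetD Train_data_dict i [])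
    let g1 := g.modify (PySem.List.pyGetD Train_labela i "") [] (fun ds => ds ++ [d])
    g1.modify (PySem.List.pyGetD Train_labelb i "") [] (fun ds => ds ++ [d])) PySem.Dict.empty
  let result := groups.items.foldl (fun r p =>
    let merged := p.2.foldl (fun m d =>
      d.items.foldl (fun m kv => m.insert kv.1 (m.getD kv.1 0 + kv.2)) m) PySem.Dict.empty
    r.insert p.1 merged) PySem.Dict.empty
  result.items.map (fun p => (p.1, p.2.items))

-- ===== PRECONDITION & SPEC =====
-- Pre_ excludes exactly the inputs where the Python A raises IndexError: a label list
-- shorter than the data list.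
def Pre_countWordsForEachClass (Train_data_dict : List (List (String × Int))) (Train_labela : List String) (Train_labelb : List String) : Prop :=
  Train_data_dict.length ≤ Train_labela.length ∧ Train_data_dict.length ≤ Train_labelb.length
instance (Train_data_dict : List (List (String × Int))) (Train_labela : List String) (Train_labelb : List String) : Decidable (Pre_countWordsForEachClass Train_data_dict Train_labela Train_labelb) := by unfold Pre_countWordsForEachClass; infer_instance
def pvWitness_countWordsForEachClass : (List (List (String × Int))) × List String × List String :=
  ([[("a", 2), ("b", 1)], [("a", 5)]], ["x", "y"], ["y", "z"])
def Spec_countWordsForEachClass (Train_data_dict : List (List (String × Int))) (Train_labela : List String) (Train_labelb : List String) (out : List (String × List (String × Int))) : Prop := out = countWordsForEachClass_alt Train_data_dict Train_labela Train_labelb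
instance (Train_data_dict : List (List (String × Int))) (Train_labela : List String) (Train_labelb : List String) (out : List (String × List (String × Int))) : Decidable (Spec_countWordsForEachClass Train_data_dict Train_labela Train_labelb out) := by unfold Spec_countWordsForEachClass; infer_instance

-- ===== CLAIM (what is proved, stated in full; the proofs are below) =====
def Claim_equal_countWordsForEachClass : Prop := ∀ (Train_data_dict : List (List (String × Int))) (Train_labela : List String) (Train_labelb : List String), Dom_countWordsForEachClass Train_data_dict Train_labela Train_labelb → Pre_countWordsForEachClass Train_data_dict Train_labela Train_labelb → Spec_countWordsForEachClass Train_data_dict Train_labela Train_labelb (countWordsForEachClass Train_data_dict Train_labela Train_labelb)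

-- ===== LEMMAS AND PROOFS =====

-- B's key-wise merge step, one merged dict, and the merge of a whole group
def mstep (m : PySem.Dict String Int) (kv : String × Int) : PySem.Dict String Int :=
  m.insert kv.1 (m.getD kv.1 0 + kv.2)
def merge1 (m : PySem.Dict String Int) (d : PySem.Dict String Int) : PySem.Dict String Int :=
  d.items.foldl mstep m
def mergeAll (ds : List (PySem.Dict String Int)) : PySem.Dict String Int :=
  ds.foldl merge1 PySem.Dict.empty

theorem astep_eq :
    (fun (inner : PySem.Dict String Int) (kv : String × Int) =>
      match inner.get? kv.1 with
      | none => inner.insert kv.1 kv.2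
      | some v => inner.insert kv.1 (v + kv.2)) = mstep := by
  funext inner kv
  cases h : inner.get? kv.1 with
  | none => simp [mstep, PySem.Dict.getD_eq_get?_getD, h]
  | some v => simp [mstep, PySem.Dict.getD_eq_get?_getD, h]

theorem upd_eq (la : String) (d : PySem.Dict String Int) (m : PySem.Dict String (PySem.Dict String Int)) :
    updatedictionaryWithWords la d m = m.modify la PySem.Dict.empty (fun inner => merge1 inner d) := by
  simp only [updatedictionaryWithWords, astep_eq, merge1]

theorem get?_eq_if {κ ν : Type} [BEq κ] [LawfulBEq κ] (d : PySem.Dict κ ν) (k : κ) (d0 : ν) :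
    d.get? k = if d.contains k then some (d.getD k d0) else none := by
  cases h : d.get? k with
  | none =>
      have hc : d.contains k = false := (PySem.Dict.get?_eq_none_iff_contains d k).1 h
      simp [hc]
  | some v =>
      have hc : d.contains k = true := by
        rw [PySem.Dict.contains_eq_isSome_get?, h]; rfl
      simp [hc, PySem.Dict.getD_eq_get?_getD, h]

theorem get?_modify_of_ne {κ ν : Type} [BEq κ] [LawfulBEq κ] [DecidableEq κ]
    (d : PySem.Dict κ ν) (k k' : κ) (d0 : ν) (f : ν → ν) (h : k' ≠ k) :
    (d.modify k d0 f).get? k' = d.get? k' := by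
  rw [get?_eq_if _ k' d0, get?_eq_if d k' d0,
    PySem.Dict.contains_modify, PySem.Dict.getD_modify]
  simp [h]

theorem get?_modify_self {κ ν : Type} [BEq κ] [LawfulBEq κ] [DecidableEq κ]
    (d : PySem.Dict κ ν) (k : κ) (d0 : ν) (f : ν → ν) :
    (d.modify k d0 f).get? k = some (f (d.getD k d0)) := by
  rw [get?_eq_if _ k d0, PySem.Dict.contains_modify, PySem.Dict.getD_modify]
  simp

theorem merge_fresh : ∀ (l : List (String × Int)) (m : PySem.Dict String Int),
    (l.map Prod.fst).Nodup → (∀ p ∈ l, m.contains p.1 = false) →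
    (l.foldl mstep m).items = m.items ++ l := by
  intro l
  induction l with
  | nil => intro m _ _; simp
  | cons p t ih =>
      intro m hnd hfr
      have hm : m.contains p.1 = false := hfr p (by simp)
      have h1 : mstep m p = m.insert p.1 p.2 := by
        simp [mstep, PySem.Dict.getD_of_not_contains m (0 : Int) hm]
      have hti := PySem.Dict.items_insert_of_not_contains m p.2 hm
      rw [List.map_cons, List.nodup_cons] at hnd
      have hfr' : ∀ q ∈ t, (m.insert p.1 p.2).contains q.1 = false := by
        intro q hq
        rw [PySem.Dict.contains_insert]
        have hne : (q.1 == p.1) = false := by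
          refine beq_eq_false_iff_ne.mpr ?_
          intro he
          exact hnd.1 (List.mem_map.2 ⟨q, hq, he⟩)
        simp [hne, hfr q (List.mem_cons_of_mem p hq)]
      calc ((p :: t).foldl mstep m).items
          = (t.foldl mstep (m.insert p.1 p.2)).items := by rw [List.foldl_cons, h1]
        _ = (m.insert p.1 p.2).items ++ t := ih (m.insert p.1 p.2) hnd.2 hfr'
        _ = m.items ++ p :: t := by rw [hti]; simp

theorem merge1_empty (d : PySem.Dict String Int) (hd : d.keys.Nodup) :
    merge1 PySem.Dict.empty d = d := by
  apply PySem.Dict.ext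
  have h := merge_fresh d.items PySem.Dict.empty (by simpa [PySem.Dict.keys] using hd)
    (by intro p _; simp)
  simpa [merge1] using h

theorem mergeAll_concat (ds : List (PySem.Dict String Int)) (d : PySem.Dict String Int) :
    mergeAll (ds ++ [d]) = merge1 (mergeAll ds) d := by
  simp [mergeAll]

-- the relation carried through the index loop: A's running dict has the same keys (same
-- order) as B's grouping, and at each key A holds the merge of B's group
def PVRel (m : PySem.Dict String (PySem.Dict String Int))
    (g : PySem.Dict String (List (PySem.Dict String Int))) : Prop :=
  m.keys = g.keys ∧ g.keys.Nodup ∧ ∀ k, m.get? k = (g.get? k).map mergeAll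

theorem step_rel (m : PySem.Dict String (PySem.Dict String Int))
    (g : PySem.Dict String (List (PySem.Dict String Int)))
    (la : String) (d : PySem.Dict String Int) (hd : d.keys.Nodup) (h : PVRel m g) :
    PVRel (match m.get? la with
         | none => m.insert la d
         | some _ => updatedictionaryWithWords la d m)
        (g.modify la [] (fun ds => ds ++ [d])) := by
  obtain ⟨hk, hn, hr⟩ := h
  cases hc : g.get? la with
  | none =>
      have hgc : g.contains la = false := (PySem.Dict.get?_eq_none_iff_contains g la).1 hc
      have hmc : m.contains la = false := by
        have hx := hr la; rw [hc] at hx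
        exact (PySem.Dict.get?_eq_none_iff_contains m la).1 (by simpa using hx)
      have hm' : m.get? la = none := (PySem.Dict.get?_eq_none_iff_contains m la).2 hmc
      rw [hm']
      have hgd : g.getD la [] = [] := PySem.Dict.getD_of_not_contains g [] hgc
      have hgk : (g.modify la [] (fun ds => ds ++ [d])).keys = g.keys ++ [la] := by
        rw [PySem.Dict.keys_modify, PySem.Dict.keys_insert_of_not_contains _ _ hgc]
      refine ⟨?_, ?_, ?_⟩
      · rw [hgk, PySem.Dict.keys_insert_of_not_contains _ _ hmc, hk]
      · rw [hgk]
        have hla : la ∉ g.keys := by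
          intro hmem
          rw [← PySem.Dict.contains_iff_mem_keys] at hmem
          simp [hgc] at hmem
        simp [List.nodup_append, hn]
        exact fun a ha he => hla (he ▸ ha)
      · intro k
        by_cases hke : k = la
        · subst hke
          rw [PySem.Dict.get?_insert_self, get?_modify_self, hgd]
          simp [mergeAll, merge1_empty d hd]
        · rw [PySem.Dict.get?_insert_of_ne _ _ hke, get?_modify_of_ne _ _ _ _ _ hke]
          exact hr k
  | some ds =>
      have hm' : m.get? la = some (mergeAll ds) := by
        have hx := hr la; rw [hc] at hx; simpa using hx
      rw [hm']
      have hgc : g.contains la = true := by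
        rw [PySem.Dict.contains_eq_isSome_get?, hc]; rfl
      have hmc : m.contains la = true := by
        rw [PySem.Dict.contains_eq_isSome_get?, hm']; rfl
      rw [upd_eq]
      have hgk : (g.modify la [] (fun ds => ds ++ [d])).keys = g.keys := by
        rw [PySem.Dict.keys_modify, PySem.Dict.keys_insert_of_contains _ _ hgc]
      have hmk : (m.modify la PySem.Dict.empty (fun inner => merge1 inner d)).keys = m.keys := by
        rw [PySem.Dict.keys_modify, PySem.Dict.keys_insert_of_contains _ _ hmc]
      refine ⟨by rw [hgk, hmk, hk], by rw [hgk]; exact hn, ?_⟩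
      intro k
      by_cases hke : k = la
      · subst hke
        rw [get?_modify_self, get?_modify_self]
        have h1 : m.getD k PySem.Dict.empty = mergeAll ds :=
          PySem.Dict.getD_of_get?_eq_some m PySem.Dict.empty hm'
        have h2 : g.getD k [] = ds := PySem.Dict.getD_of_get?_eq_some g [] hc
        rw [h1, h2]
        simp [mergeAll_concat]
      · rw [get?_modify_of_ne _ _ _ _ _ hke, get?_modify_of_ne _ _ _ _ _ hke]
        exact hr k

theorem loop_rel (Train_data_dict : List (List (String × Int)))
    (Train_labela Train_labelb : List String) :
    ∀ (l : List Int) (m : PySem.Dict String (PySem.Dict String Int))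
      (g : PySem.Dict String (List (PySem.Dict String Int))), PVRel m g →
      PVRel (l.foldl (fun acc i =>
            let d := PySem.Dict.ofList (PySem.List.pyGetD Train_data_dict i [])
            let la := PySem.List.pyGetD Train_labela i ""
            let acc1 := match acc.get? la with
              | none => acc.insert la d
              | some _ => updatedictionaryWithWords la d acc
            let lb := PySem.List.pyGetD Train_labelb i ""
            match acc1.get? lb with
              | none => acc1.insert lb d
              | some _ => updatedictionaryWithWords lb d acc1) m)
          (l.foldl (fun g i =>
            let d := PySem.Dict.ofList (PySem.List.pyGetD Train_data_dict i [])
            let g1 := g.modify (PySem.List.pyGetD Train_labela i "") [] (fun ds => ds ++ [d])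
            g1.modify (PySem.List.pyGetD Train_labelb i "") [] (fun ds => ds ++ [d])) g) := by
  intro l
  induction l with
  | nil => intro m g h; exact h
  | cons i t ih =>
      intro m g h
      simp only [List.foldl_cons]
      apply ih
      have hd : (PySem.Dict.ofList (PySem.List.pyGetD Train_data_dict i [])).keys.Nodup :=
        PySem.Dict.nodup_keys_ofList _
      exact step_rel _ _ _ _ hd (step_rel _ _ _ _ hd h)

theorem rel_items (m : PySem.Dict String (PySem.Dict String Int))
    (g : PySem.Dict String (List (PySem.Dict String Int))) (h : PVRel m g) :
    m.items = g.items.map (fun p => (p.1, mergeAll p.2)) := by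
  obtain ⟨hk, hn, hr⟩ := h
  have hmn : m.keys.Nodup := hk ▸ hn
  have hk' : m.items.map (fun p => p.1) = g.items.map (fun p => p.1) := by
    simpa [PySem.Dict.keys] using hk
  have hlen : m.items.length = g.items.length := by
    have hx := congrArg List.length hk'
    simpa using hx
  apply List.ext_getElem (by simpa using hlen)
  intro i h1 h2
  have h2' : i < g.items.length := by simpa using h2
  have hfst : m.items[i].1 = g.items[i].1 := by
    have hx := congrArg (fun l => l[i]?) hk'
    simp only [List.getElem?_map, List.getElem?_eq_getElem h1,
      List.getElem?_eq_getElem h2', Option.map_some, Option.some.injEq] at hx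
    exact hx
  have hmg : m.get? (m.items[i].1) = some (m.items[i].2) :=
    PySem.Dict.get?_of_mem_items m (List.getElem_mem h1) hmn
  have hgg : g.get? (g.items[i].1) = some (g.items[i].2) :=
    PySem.Dict.get?_of_mem_items g (List.getElem_mem h2') hn
  have hx := hr (m.items[i].1)
  rw [hmg, hfst, hgg] at hx
  simp only [Option.map_some, Option.some.injEq] at hx
  simp only [List.getElem_map]
  exact Prod.ext hfst (by rw [hx])

theorem main_eq (Train_data_dict : List (List (String × Int)))
    (Train_labela Train_labelb : List String) :
    countWordsForEachClass Train_data_dict Train_labela Train_labelb =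
      countWordsForEachClass_alt Train_data_dict Train_labela Train_labelb := by
  have hrel0 : PVRel PySem.Dict.empty PySem.Dict.empty :=
    ⟨by simp, by simp, fun k => by simp⟩
  have h := loop_rel Train_data_dict Train_labela Train_labelb
    (PySem.List.pyRange 0 (Train_data_dict.length : Int) 1) PySem.Dict.empty PySem.Dict.empty hrel0
  have hitems := rel_items _ _ h
  have hn := h.2.1
  have hndk : (((PySem.List.pyRange 0 (Train_data_dict.length : Int) 1).foldl (fun g i =>
            let d := PySem.Dict.ofList (PySem.List.pyGetD Train_data_dict i [])
            let g1 := g.modify (PySem.List.pyGetD Train_labela i "") [] (fun ds => ds ++ [d])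
            g1.modify (PySem.List.pyGetD Train_labelb i "") [] (fun ds => ds ++ [d]))
            PySem.Dict.empty).items.map Prod.fst).Nodup := by
    simpa [PySem.Dict.keys] using hn
  have hres := PySem.Dict.items_foldl_insert_fresh
    (((PySem.List.pyRange 0 (Train_data_dict.length : Int) 1).foldl (fun g i =>
            let d := PySem.Dict.ofList (PySem.List.pyGetD Train_data_dict i [])
            let g1 := g.modify (PySem.List.pyGetD Train_labela i "") [] (fun ds => ds ++ [d])
            g1.modify (PySem.List.pyGetD Train_labelb i "") [] (fun ds => ds ++ [d]))
            PySem.Dict.empty).items)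
    Prod.fst (fun p => mergeAll p.2) PySem.Dict.empty
    (by intro a _; simp) hndk
  show (((PySem.List.pyRange 0 (Train_data_dict.length : Int) 1).foldl (fun acc i =>
            let d := PySem.Dict.ofList (PySem.List.pyGetD Train_data_dict i [])
            let la := PySem.List.pyGetD Train_labela i ""
            let acc1 := match acc.get? la with
              | none => acc.insert la d
              | some _ => updatedictionaryWithWords la d acc
            let lb := PySem.List.pyGetD Train_labelb i ""
            match acc1.get? lb with
              | none => acc1.insert lb d
              | some _ => updatedictionaryWithWords lb d acc1)
            PySem.Dict.empty).items.map (fun p => (p.1, p.2.items))) =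
      (((((PySem.List.pyRange 0 (Train_data_dict.length : Int) 1).foldl (fun g i =>
            let d := PySem.Dict.ofList (PySem.List.pyGetD Train_data_dict i [])
            let g1 := g.modify (PySem.List.pyGetD Train_labela i "") [] (fun ds => ds ++ [d])
            g1.modify (PySem.List.pyGetD Train_labelb i "") [] (fun ds => ds ++ [d]))
            PySem.Dict.empty).items).foldl
          (fun d a => d.insert (Prod.fst a) ((fun p => mergeAll p.2) a)) PySem.Dict.empty).items.map
        (fun p => (p.1, p.2.items)))
  rw [hres, hitems]
  have he : (PySem.Dict.empty : PySem.Dict String (PySem.Dict String Int)).items = [] := rfl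
  simp [he]

-- ===== VERDICT (by name: the statement is the Claim_ definition above) =====
theorem countWordsForEachClass_spec : Claim_equal_countWordsForEachClass := by
  intro Train_data_dict Train_labela Train_labelb _ _
  exact main_eq Train_data_dict Train_labela Train_labelb
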